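-- pv_equiv track=rewrite | github.com/Denniswillie/bfs_dfs_comparison | bfs_dfs_comparison.py | dfs
-- ===== SOURCE A (Python) =====
-- def dfs(graph, start_node, target_node):
-- 	result = []
--
-- 	def helper(curr_path):
-- 		if len(curr_path) == 3:
-- 			result.append(curr_path[1])
-- 			return
-- 		curr_node = curr_path[-1]
-- 		curr_node_followings = graph[curr_node]
-- 		for node in curr_node_followings:
-- 			if len(curr_path) == 2:
-- 				if node == target_node:
-- 					helper([curr_path[0], curr_path[1], node])
-- 			else:
-- 				helper([curr_path[0], node])
--
-- 	helper([start_node])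
-- 	return result
-- ===== SOURCE B (Python) =====
-- def dfs(graph, start_node, target_node):
--     return [node for node in graph[start_node] for nb in graph[node] if nb == target_node]
-- ===== Notes on version B (the rewrite author's own statement) =====
-- stated objective: simpler
-- what changed: Replaced the recursive path-building helper with a single nested comprehension over graph[start_node] and graph[node], keeping one append per matching occurrence and the same order.
import Mathlib
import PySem

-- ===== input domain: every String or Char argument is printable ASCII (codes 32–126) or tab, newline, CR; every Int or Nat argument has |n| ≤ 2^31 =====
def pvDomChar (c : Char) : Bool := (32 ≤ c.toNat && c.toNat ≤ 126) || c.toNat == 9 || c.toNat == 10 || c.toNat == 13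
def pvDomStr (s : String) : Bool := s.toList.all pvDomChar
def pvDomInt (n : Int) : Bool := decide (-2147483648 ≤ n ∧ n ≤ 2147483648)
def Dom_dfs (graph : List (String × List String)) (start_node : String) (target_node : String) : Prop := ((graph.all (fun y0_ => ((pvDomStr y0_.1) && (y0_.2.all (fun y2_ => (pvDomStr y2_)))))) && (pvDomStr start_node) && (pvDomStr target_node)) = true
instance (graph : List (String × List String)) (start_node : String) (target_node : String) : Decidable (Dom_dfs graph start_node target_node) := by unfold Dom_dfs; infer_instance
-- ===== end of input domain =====

-- B replaces A's recursive path-building helper with a single nested comprehension; same order,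
-- one append per matching occurrence. Neither version mutates its arguments.

-- ===== PORT A =====
-- A's inner `helper(curr_path)` appends to `result`; ported with the result list threaded as an
-- accumulator.  The recursion depth is bounded by the path length (1 → 2 → 3), ported as a fuel
-- argument that only makes the same computation total; graph[k] is Dict.getD (KeyError, i.e.
-- get? = none, is excluded by Pre_dfs).
def dfsHelper (graph : List (String × List String)) (target_node : String) :
    Nat → List String → List String → List String
  | 0, _, result => result
  | fuel + 1, curr_path, result =>
    if curr_path.length = 3 then
      result ++ [((PySem.List.pyGet? curr_path 1).getD "")]
    else
      let curr_node := (PySem.List.pyGet? curr_path (-1)).getD ""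
      let curr_node_followings := PySem.Dict.getD (PySem.Dict.mk graph) curr_node []
      curr_node_followings.foldl
        (fun result node =>
          if curr_path.length = 2 then
            if node == target_node then
              dfsHelper graph target_node fuel
                [((PySem.List.pyGet? curr_path 0).getD ""),
                 ((PySem.List.pyGet? curr_path 1).getD ""), node] result
            else result
          else
            dfsHelper graph target_node fuel
              [((PySem.List.pyGet? curr_path 0).getD ""), node] result)
        result

def dfs (graph : List (String × List String)) (start_node : String) (target_node : String) : List String :=
  dfsHelper graph target_node 3 [start_node] []

-- ===== PORT B =====
def dfs_alt (graph : List (String × List String)) (start_node : String) (target_node : String) : List String :=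
  (PySem.Dict.getD (PySem.Dict.mk graph) start_node []).flatMap
    (fun node => ((PySem.Dict.getD (PySem.Dict.mk graph) node []).filter
      (fun nb => nb == target_node)).map (fun _ => node))

-- ===== PRECONDITION & SPEC =====
-- Pre_ excludes exactly the KeyError inputs: start_node must be a key of graph and every
-- neighbour of start_node must be a key (Python's A raises KeyError otherwise).
def Pre_dfs (graph : List (String × List String)) (start_node : String) (target_node : String) : Prop :=
  (PySem.Dict.get? (PySem.Dict.mk graph) start_node).isSome = true ∧
  ∀ n ∈ PySem.Dict.getD (PySem.Dict.mk graph) start_node [],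
    (PySem.Dict.get? (PySem.Dict.mk graph) n).isSome = true
instance (graph : List (String × List String)) (start_node : String) (target_node : String) : Decidable (Pre_dfs graph start_node target_node) := by unfold Pre_dfs; infer_instance

def pvWitness_dfs : (List (String × List String)) × String × String :=
  ([("a", ["b"]), ("b", ["c", "b"])], "a", "c")

def Spec_dfs (graph : List (String × List String)) (start_node : String) (target_node : String) (out : List String) : Prop := out = dfs_alt graph start_node target_node
instance (graph : List (String × List String)) (start_node : String) (target_node : String) (out : List String) : Decidable (Spec_dfs graph start_node target_node out) := by unfold Spec_dfs; infer_instance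

-- ===== CLAIM (what is proved, stated in full; the proofs are below) =====
def Claim_equal_dfs : Prop := ∀ (graph : List (String × List String)) (start_node : String) (target_node : String), Dom_dfs graph start_node target_node → Pre_dfs graph start_node target_node → Spec_dfs graph start_node target_node (dfs graph start_node target_node)

-- ===== LEMMAS AND PROOFS =====

-- a length-3 call of A's helper appends the path's middle element once
lemma dfsHelper_len3 (graph : List (String × List String)) (target_node a b c : String)
    (res : List String) :
    dfsHelper graph target_node 1 [a, b, c] res = res ++ [b] := by
  show dfsHelper graph target_node (0 + 1) [a, b, c] res = res ++ [b]
  rw [dfsHelper]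
  simp [PySem.List.pyGet?, PySem.List.pyIdx?]

-- a length-2 call of A's helper appends the path's last node once per occurrence of the target
lemma dfsHelper_len2 (graph : List (String × List String)) (target_node s x : String)
    (res : List String) :
    dfsHelper graph target_node 2 [s, x] res
      = res ++ ((PySem.Dict.getD (PySem.Dict.mk graph) x []).filter
          (fun nb => nb == target_node)).map (fun _ => x) := by
  show dfsHelper graph target_node (1 + 1) [s, x] res = _
  rw [dfsHelper]
  simp only [show ([s, x] : List String).length = 2 from rfl,
    show (2 = 3) = False from by decide, if_false,
    show PySem.List.pyGet? ([s, x] : List String) (-1) = some x from rfl,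
    show PySem.List.pyGet? ([s, x] : List String) 0 = some s from rfl,
    show PySem.List.pyGet? ([s, x] : List String) 1 = some x from rfl, Option.getD_some]
  refine (PySem.List.foldl_congr_mem _ _
      (fun res nb => if nb == target_node then res ++ [x] else res) _ ?_).trans
      (PySem.List.foldl_append_if _ _ _ _)
  intro acc nb _
  by_cases h : nb == target_node
  · simp only [h, if_true]; exact dfsHelper_len3 graph target_node s x nb acc
  · simp [h]

-- ===== VERDICT (by name: the statement is the Claim_ definition above) =====
theorem dfs_spec : Claim_equal_dfs := by
  intro graph start_node target_node _ _
  show dfs graph start_node target_node = dfs_alt graph start_node target_node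
  unfold dfs dfs_alt
  show dfsHelper graph target_node (2 + 1) [start_node] [] = _
  rw [dfsHelper]
  simp only [show ([start_node] : List String).length = 1 from rfl,
    show (1 = 3) = False from by decide, show (1 = 2) = False from by decide, if_false,
    show PySem.List.pyGet? ([start_node] : List String) (-1) = some start_node from rfl,
    show PySem.List.pyGet? ([start_node] : List String) 0 = some start_node from rfl,
    Option.getD_some]
  refine (PySem.List.foldl_congr_mem _ _
      (fun res node => res ++ ((PySem.Dict.getD (PySem.Dict.mk graph) node []).filter
        (fun nb => nb == target_node)).map (fun _ => node)) _ ?_).trans ?_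
  · intro acc node _
    exact dfsHelper_len2 graph target_node start_node node acc
  · rw [PySem.List.foldl_append_eq_flatMap, List.nil_append]
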